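-- pv_equiv track=rewrite | github.com/lemonpaul/matrix | theorem.py | partial_h_class
-- ===== SOURCE A (Python) =====
-- def join(vector1, vector2):
--     if len(vector1) != len(vector2):
--         return None
--     return [max(e1, e2) for e1, e2 in zip(vector1, vector2)]
--
-- def space(matrix):
--     space = set([tuple(vector) for vector in matrix])
--
--     n = len(matrix)
--     m = len(matrix[0])
--
--     for i in range(n):
--         for j in range(i+1, n):
--             space.add(tuple(join(matrix[i], matrix[j])))
--
--     space.add((0,) * m)
--
--     return space
--
-- def transpose(matrix):
--     width = len(matrix[0])
--
--     transpose_matrix = [[]] * width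
--     for i in range(width):
--         transpose_matrix[i] = [vector[i] for vector in matrix]
--
--     return transpose_matrix
--
-- def column_space(matrix):
--     transpose_matrix = transpose(matrix)
--     return space(transpose_matrix)
--
-- def row_space(matrix):
--     return space(matrix)
--
-- def h_equivalent(matrix1, matrix2):
--     return row_space(matrix1) == row_space(matrix2) and \
--         column_space(matrix1) == column_space(matrix2)
--
-- def partial_h_class(matrices):
--     h_classes = []
--
--     for matrix in matrices:
--         for h_class in h_classes:
--             class_matrix = h_class[0]
--             if h_equivalent(matrix, class_matrix):
--                 h_class.append(matrix)
--                 break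
--         else:
--             h_class = [matrix]
--             h_classes.append(h_class)
--
--     return h_classes
-- ===== SOURCE B (Python) =====
-- def _space_sig(matrix):
--     """Frozenset of all pairwise joins (each row joined with itself too,
--     so the rows themselves are covered) plus the zero vector."""
--     s = {tuple(max(a, b) for a, b in zip(r1, r2))
--          for i, r1 in enumerate(matrix) for r2 in matrix[i:]}
--     s.add((0,) * (len(matrix[0]) if matrix else 0))
--     return frozenset(s)
--
--
-- def partial_h_class(matrices):
--     groups = {}
--     for matrix in matrices:
--         cols = [list(c) for c in zip(*matrix)]
--         sig = (_space_sig(matrix), _space_sig(cols))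
--         groups.setdefault(sig, []).append(matrix)
--     return list(groups.values())
-- ===== Notes on version B (the rewrite author's own statement) =====
-- stated objective: faster
-- what changed: B computes each matrix's (row-space, column-space) frozenset signature once and groups via an insertion-ordered dict keyed by that signature, instead of A's scan over class representatives that recomputes both spaces of the representative at every comparison.
import Mathlib
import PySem

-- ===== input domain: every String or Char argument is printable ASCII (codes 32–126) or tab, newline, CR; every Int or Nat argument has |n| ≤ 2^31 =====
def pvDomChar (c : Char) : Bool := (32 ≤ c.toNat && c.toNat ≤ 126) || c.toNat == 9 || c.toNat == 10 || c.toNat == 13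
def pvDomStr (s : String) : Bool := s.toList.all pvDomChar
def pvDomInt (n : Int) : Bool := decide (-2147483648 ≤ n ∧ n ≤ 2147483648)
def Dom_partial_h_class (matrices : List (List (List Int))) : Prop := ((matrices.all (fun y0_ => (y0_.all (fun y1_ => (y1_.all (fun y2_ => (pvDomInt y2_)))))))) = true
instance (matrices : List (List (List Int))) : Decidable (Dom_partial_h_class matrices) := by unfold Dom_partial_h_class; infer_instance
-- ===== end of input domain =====

-- B groups matrices by a (row-space, column-space) signature computed ONCE per matrix
-- instead of recomputing both spaces of the class representative at every comparison.

-- ===== PORT A =====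

-- join(vector1, vector2): None (ported as Option.none) when the lengths differ
def pvAJoin (v1 v2 : List Int) : Option (List Int) :=
  if v1.length ≠ v2.length then none
  else some ((v1.zip v2).map (fun p => max p.1 p.2))

-- space(matrix); tuple(join(..)) raises on None in Python — those inputs are outside Pre_,
-- the port uses .getD [] there (nothing is claimed on such inputs)
def pvASpace (matrix : List (List Int)) : PySem.Set (List Int) :=
  let s0 : PySem.Set (List Int) := PySem.Set.ofList matrix
  let n : Int := matrix.length
  let m : Nat := (PySem.List.pyGetD matrix 0 []).length
  let s1 := (PySem.List.pyRange 0 n 1).foldl (fun s i =>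
      (PySem.List.pyRange (i+1) n 1).foldl (fun s j =>
        PySem.Set.add s ((pvAJoin (PySem.List.pyGetD matrix i [])
                                  (PySem.List.pyGetD matrix j [])).getD [])) s) s0
  PySem.Set.add s1 (List.replicate m 0)

-- transpose(matrix): preallocate-then-assign builds exactly the list of columns
def pvATranspose (matrix : List (List Int)) : List (List Int) :=
  let width : Int := (PySem.List.pyGetD matrix 0 []).length
  (PySem.List.pyRange 0 width 1).map (fun i => matrix.map (fun v => PySem.List.pyGetD v i 0))

def pvAColumnSpace (matrix : List (List Int)) : PySem.Set (List Int) :=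
  pvASpace (pvATranspose matrix)

def pvARowSpace (matrix : List (List Int)) : PySem.Set (List Int) :=
  pvASpace matrix

-- h_equivalent: Python's set == is PySem.Set.equal
def pvAHEquiv (m1 m2 : List (List Int)) : Bool :=
  PySem.Set.equal (pvARowSpace m1) (pvARowSpace m2) &&
    PySem.Set.equal (pvAColumnSpace m1) (pvAColumnSpace m2)

-- the inner for/else loop over h_classes: first matching class gets matrix appended,
-- else a fresh class is appended at the end
def pvAInsert (mat : List (List Int)) : List (List (List (List Int))) → List (List (List (List Int)))
  | [] => [[mat]]
  | c :: rest =>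
      if pvAHEquiv mat (PySem.List.pyGetD c 0 []) then (c ++ [mat]) :: rest
      else c :: pvAInsert mat rest

def partial_h_class (matrices : List (List (List Int))) : List (List (List (List Int))) :=
  matrices.foldl (fun cs mat => pvAInsert mat cs) []

-- ===== PORT B =====

-- tuple(max(a, b) for a, b in zip(r1, r2))
def pvBJoin (v1 v2 : List Int) : List Int := List.zipWith max v1 v2

-- the comprehension {join(r1, r2) for i, r1 in enumerate(matrix) for r2 in matrix[i:]}
def pvBPairJoins : List (List Int) → List (List Int)
  | [] => []
  | r :: rest => (r :: rest).map (pvBJoin r) ++ pvBPairJoins rest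

-- _space_sig(matrix); (len(matrix[0]) if matrix else 0) is (matrix.headD []).length
def pvBSpaceSig (matrix : List (List Int)) : PySem.Set (List Int) :=
  PySem.Set.add (PySem.Set.ofList (pvBPairJoins matrix)) (List.replicate (matrix.headD []).length 0)

-- zip(*matrix): columns until the shortest row is exhausted (the first row's length
-- bounds the number of steps, so it serves as structural fuel)
def pvBZipStarGo : Nat → List (List Int) → List (List Int)
  | 0, _ => []
  | w+1, m =>
      if m.any (·.isEmpty) then []
      else (m.map (·.headD 0)) :: pvBZipStarGo w (m.map (·.tail))

def pvBCols (matrix : List (List Int)) : List (List Int) :=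
  pvBZipStarGo (matrix.headD []).length matrix

def pvBSig (matrix : List (List Int)) : PySem.Set (List Int) × PySem.Set (List Int) :=
  (pvBSpaceSig matrix, pvBSpaceSig (pvBCols matrix))

-- Python compares the frozenset-pair keys with ==, i.e. as sets
def pvBSigEq (s t : PySem.Set (List Int) × PySem.Set (List Int)) : Bool :=
  PySem.Set.equal s.1 t.1 && PySem.Set.equal s.2 t.2

-- groups.setdefault(sig, []).append(matrix) on the insertion-ordered dict
def pvBUpdate (sig : PySem.Set (List Int) × PySem.Set (List Int)) (mat : List (List Int)) :
    List ((PySem.Set (List Int) × PySem.Set (List Int)) × List (List (List Int))) →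
    List ((PySem.Set (List Int) × PySem.Set (List Int)) × List (List (List Int)))
  | [] => [(sig, [mat])]
  | (k, v) :: rest =>
      if pvBSigEq k sig then (k, v ++ [mat]) :: rest
      else (k, v) :: pvBUpdate sig mat rest

def partial_h_class_alt (matrices : List (List (List Int))) : List (List (List (List Int))) :=
  (matrices.foldl (fun es mat => pvBUpdate (pvBSig mat) mat es) []).map (·.2)

-- ===== PRECONDITION & SPEC =====
-- Pre_ is exactly the set of inputs on which the Python A returns: with at most one matrix no
-- space is ever computed, and with two or more matrices every matrix's spaces get computed, so
-- each matrix must be nonempty and rectangular and at most one matrix may have empty rows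
-- (two such matrices have equal row spaces, so A computes the space of a zero-width transpose and raises).
def Pre_partial_h_class (matrices : List (List (List Int))) : Prop :=
  matrices.length ≤ 1 ∨
    ((∀ mat ∈ matrices, mat ≠ [] ∧ ∀ row ∈ mat, row.length = (mat.headD []).length) ∧
      matrices.countP (fun mat => (mat.headD []).isEmpty) ≤ 1)

instance (matrices : List (List (List Int))) : Decidable (Pre_partial_h_class matrices) := by
  unfold Pre_partial_h_class; infer_instance

def pvWitness_partial_h_class : List (List (List Int)) := [[[1, 0], [0, 1]], [[1, 1]]]

def Spec_partial_h_class (matrices : List (List (List Int))) (out : List (List (List (List Int)))) : Prop := out = partial_h_class_alt matrices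
instance (matrices : List (List (List Int))) (out : List (List (List (List Int)))) : Decidable (Spec_partial_h_class matrices out) := by unfold Spec_partial_h_class; infer_instance

-- ===== CLAIM (what is proved, stated in full; the proofs are below) =====
def Claim_equal_partial_h_class : Prop := ∀ (matrices : List (List (List Int))), Dom_partial_h_class matrices → Pre_partial_h_class matrices → Spec_partial_h_class matrices (partial_h_class matrices)

-- ===== LEMMAS AND PROOFS =====

-- a matrix is rectangular: every row has the first row's length
def pvRectP (m : List (List Int)) : Prop :=
  ∀ row ∈ m, row.length = (m.headD []).length

-- the mathematical contents of both space computations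
def pvSpaceP (m : List (List Int)) (x : List Int) : Prop :=
  (∃ r1 ∈ m, ∃ r2 ∈ m, x = List.zipWith max r1 r2) ∨
    x = List.replicate (m.headD []).length 0

theorem pvZipMap (v1 v2 : List Int) :
    (v1.zip v2).map (fun p => max p.1 p.2) = List.zipWith max v1 v2 := by
  induction v1 generalizing v2 with
  | nil => simp
  | cons a t ih => cases v2 <;> simp [ih]

theorem pvZipWithMaxComm (v1 v2 : List Int) :
    List.zipWith max v1 v2 = List.zipWith max v2 v1 :=
  List.zipWith_comm_of_comm (fun a b => max_comm a b)

theorem pvZipWithMaxSelf (v : List Int) : List.zipWith max v v = v := by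
  simp [List.zipWith_self, max_self]

theorem pvJoinVal (a b : List Int) (h : a.length = b.length) :
    (pvAJoin a b).getD [] = List.zipWith max a b := by
  simp [pvAJoin, h, pvZipMap]

theorem pvGet0 (m : List (List Int)) : PySem.List.pyGetD m 0 ([] : List Int) = m.headD [] := by
  rw [PySem.List.pyGetD_zero]; cases m <;> rfl

theorem pvGetNat {α : Type} (m : List α) (k : Nat) (d : α) (hk : k < m.length) :
    PySem.List.pyGetD m (k : Int) d = m[k] := by
  rw [PySem.List.pyGetD_natCast]; exact List.getD_eq_getElem m d hk

theorem pvMemFoldlAcc {α : Type} (l : List α) (g : PySem.Set (List Int) → α → PySem.Set (List Int))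
    (P : α → List Int → Prop)
    (hg : ∀ s a x, x ∈ g s a ↔ x ∈ s ∨ P a x) :
    ∀ (s : PySem.Set (List Int)) (x : List Int),
      x ∈ l.foldl g s ↔ x ∈ s ∨ ∃ a ∈ l, P a x := by
  induction l with
  | nil => simp
  | cons a t ih =>
      intro s x
      rw [List.foldl_cons, ih, hg]
      simp only [List.mem_cons]
      constructor
      · rintro ((hs | hp) | ⟨b, hb, hP⟩)
        · exact Or.inl hs
        · exact Or.inr ⟨a, Or.inl rfl, hp⟩
        · exact Or.inr ⟨b, Or.inr hb, hP⟩
      · rintro (hs | ⟨b, (rfl | hb), hP⟩)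
        · exact Or.inl (Or.inl hs)
        · exact Or.inl (Or.inr hP)
        · exact Or.inr ⟨b, hb, hP⟩

theorem pvMemASpace (m : List (List Int)) (hR : pvRectP m) (x : List Int) :
    x ∈ pvASpace m ↔ pvSpaceP m x := by
  have houter : ∀ (s : PySem.Set (List Int)) (y : List Int),
      y ∈ (PySem.List.pyRange 0 (m.length : Int) 1).foldl (fun s i =>
        (PySem.List.pyRange (i+1) (m.length : Int) 1).foldl (fun s j =>
          PySem.Set.add s ((pvAJoin (PySem.List.pyGetD m i []) (PySem.List.pyGetD m j [])).getD [])) s) s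
      ↔ y ∈ s ∨ ∃ i ∈ PySem.List.pyRange 0 (m.length : Int) 1,
          ∃ j ∈ PySem.List.pyRange (i+1) (m.length : Int) 1,
            y = (pvAJoin (PySem.List.pyGetD m i []) (PySem.List.pyGetD m j [])).getD [] := by
    intro s y
    refine pvMemFoldlAcc _ _
      (fun i z => ∃ j ∈ PySem.List.pyRange (i+1) (m.length : Int) 1,
        z = (pvAJoin (PySem.List.pyGetD m i []) (PySem.List.pyGetD m j [])).getD []) ?_ s y
    intro s' i z
    exact pvMemFoldlAcc _ _
      (fun j z => z = (pvAJoin (PySem.List.pyGetD m i []) (PySem.List.pyGetD m j [])).getD [])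
      (fun s'' j z => PySem.Set.mem_add s'' _ z) s' z
  have hmem : x ∈ pvASpace m ↔
      ((x ∈ m ∨ ∃ i ∈ PySem.List.pyRange 0 (m.length : Int) 1,
          ∃ j ∈ PySem.List.pyRange (i+1) (m.length : Int) 1,
            x = (pvAJoin (PySem.List.pyGetD m i []) (PySem.List.pyGetD m j [])).getD []) ∨
        x = List.replicate (m.headD []).length 0) := by
    simp only [pvASpace, pvGet0]
    rw [PySem.Set.mem_add, houter, PySem.Set.mem_ofList]
  rw [hmem]
  unfold pvSpaceP
  constructor
  · rintro ((hx | ⟨i, hi, j, hj, rfl⟩) | hx)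
    · exact Or.inl ⟨x, hx, x, hx, (pvZipWithMaxSelf x).symm⟩
    · rw [PySem.List.mem_pyRange_one] at hi hj
      obtain ⟨ki, rfl⟩ : ∃ k : Nat, i = (k : Int) := ⟨i.toNat, (Int.toNat_of_nonneg hi.1).symm⟩
      obtain ⟨kj, rfl⟩ : ∃ k : Nat, j = (k : Int) := ⟨j.toNat, (Int.toNat_of_nonneg (by omega)).symm⟩
      have hki : ki < m.length := by exact_mod_cast hi.2
      have hkj : kj < m.length := by exact_mod_cast hj.2
      rw [pvGetNat m ki _ hki, pvGetNat m kj _ hkj,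
          pvJoinVal _ _ (by rw [hR _ (List.getElem_mem hki), hR _ (List.getElem_mem hkj)])]
      exact Or.inl ⟨m[ki], List.getElem_mem hki, m[kj], List.getElem_mem hkj, rfl⟩
    · exact Or.inr hx
  · rintro (⟨r1, h1, r2, h2, rfl⟩ | hx)
    · obtain ⟨i, hi, rfl⟩ := List.mem_iff_getElem.mp h1
      obtain ⟨j, hj, rfl⟩ := List.mem_iff_getElem.mp h2
      rcases Nat.lt_trichotomy i j with h | h | h
      · refine Or.inl (Or.inr ⟨(i : Int), ?_, (j : Int), ?_, ?_⟩)
        · rw [PySem.List.mem_pyRange_one]; omega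
        · rw [PySem.List.mem_pyRange_one]; omega
        · rw [pvGetNat m i _ hi, pvGetNat m j _ hj,
              pvJoinVal _ _ (by rw [hR _ (List.getElem_mem hi), hR _ (List.getElem_mem hj)])]
      · subst h
        rw [pvZipWithMaxSelf]
        exact Or.inl (Or.inl (List.getElem_mem hi))
      · refine Or.inl (Or.inr ⟨(j : Int), ?_, (i : Int), ?_, ?_⟩)
        · rw [PySem.List.mem_pyRange_one]; omega
        · rw [PySem.List.mem_pyRange_one]; omega
        · rw [pvGetNat m j _ hj, pvGetNat m i _ hi,
              pvJoinVal _ _ (by rw [hR _ (List.getElem_mem hj), hR _ (List.getElem_mem hi)]),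
              pvZipWithMaxComm]
    · exact Or.inr hx

theorem pvPairJoinsMem (l : List (List Int)) (r1 r2 : List Int) (h1 : r1 ∈ l) (h2 : r2 ∈ l) :
    List.zipWith max r1 r2 ∈ pvBPairJoins l := by
  induction l with
  | nil => cases h1
  | cons r t ih =>
      unfold pvBPairJoins
      rw [List.mem_append]
      rcases List.mem_cons.mp h1 with rfl | h1'
      · exact Or.inl (List.mem_map.mpr ⟨r2, h2, rfl⟩)
      · rcases List.mem_cons.mp h2 with rfl | h2'
        · exact Or.inl (List.mem_map.mpr ⟨r1, List.mem_cons_of_mem _ h1',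
            (pvZipWithMaxComm r1 r2).symm⟩)
        · exact Or.inr (ih h1' h2')

theorem pvPairJoinsSub (l : List (List Int)) (x : List Int) (hx : x ∈ pvBPairJoins l) :
    ∃ r1 ∈ l, ∃ r2 ∈ l, x = List.zipWith max r1 r2 := by
  induction l with
  | nil => cases hx
  | cons r t ih =>
      unfold pvBPairJoins at hx
      rcases List.mem_append.mp hx with hm | hm
      · obtain ⟨r2, hr2, rfl⟩ := List.mem_map.mp hm
        exact ⟨r, List.mem_cons_self, r2, hr2, rfl⟩
      · obtain ⟨r1, h1, r2, h2, rfl⟩ := ih hm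
        exact ⟨r1, List.mem_cons_of_mem _ h1, r2, List.mem_cons_of_mem _ h2, rfl⟩

theorem pvMemBSpace (m : List (List Int)) (x : List Int) :
    x ∈ pvBSpaceSig m ↔ pvSpaceP m x := by
  unfold pvBSpaceSig pvSpaceP
  rw [PySem.Set.mem_add, PySem.Set.mem_ofList]
  constructor
  · rintro (hm | hx)
    · exact Or.inl (pvPairJoinsSub m x hm)
    · exact Or.inr hx
  · rintro (⟨r1, h1, r2, h2, rfl⟩ | hx)
    · exact Or.inl (pvPairJoinsMem m r1 r2 h1 h2)
    · exact Or.inr hx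

theorem pvGoSpec (w : Nat) : ∀ (m : List (List Int)), (∀ r ∈ m, w ≤ r.length) →
    pvBZipStarGo w m = (List.range w).map (fun k => m.map (fun v => v.getD k 0)) := by
  induction w with
  | zero => intro m _; simp [pvBZipStarGo]
  | succ w ih =>
      intro m hm
      have hany : m.any (·.isEmpty) = false := by
        rw [List.any_eq_false]
        intro r hr
        have := hm r hr
        simp only [List.isEmpty_iff]
        intro h; subst h; simp at this
      unfold pvBZipStarGo
      rw [hany]
      simp only [Bool.false_eq_true, if_false]
      rw [ih (m.map (·.tail)) (by
        intro r' hr'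
        obtain ⟨r, hr, rfl⟩ := List.mem_map.mp hr'
        have := hm r hr
        simp [List.length_tail]; omega)]
      rw [List.range_succ_eq_map]
      simp only [List.map_cons, List.map_map]
      congr 1
      · apply List.map_congr_left
        intro v _
        cases v <;> rfl
      · apply List.map_congr_left
        intro k _
        simp only [Function.comp]
        apply List.map_congr_left
        intro v _
        cases v <;> simp

theorem pvColsEq (m : List (List Int)) (hR : pvRectP m) : pvBCols m = pvATranspose m := by
  unfold pvBCols pvATranspose
  show pvBZipStarGo (m.headD []).length m =
    (PySem.List.pyRange 0 ((PySem.List.pyGetD m 0 ([] : List Int)).length : Int) 1).map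
      (fun i => m.map (fun v => PySem.List.pyGetD v i 0))
  rw [pvGet0, pvGoSpec _ m (fun r hr => le_of_eq (hR r hr).symm),
      PySem.List.pyRange_zero_nat, List.map_map]
  apply List.map_congr_left
  intro k _
  simp only [Function.comp]
  apply List.map_congr_left
  intro v _
  rw [PySem.List.pyGetD_natCast]

theorem pvRectTranspose (m : List (List Int)) : pvRectP (pvATranspose m) := by
  intro row hrow
  have hlen : ∀ r ∈ pvATranspose m, r.length = m.length := by
    intro r hr
    unfold pvATranspose at hr
    obtain ⟨i, _, rfl⟩ := List.mem_map.mp hr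
    simp
  rw [hlen row hrow]
  cases hT : pvATranspose m with
  | nil => rw [hT] at hrow; cases hrow
  | cons h t =>
      have hh : h ∈ pvATranspose m := by rw [hT]; exact List.mem_cons_self
      rw [List.headD_cons]
      exact (hlen h hh).symm

theorem pvEqualEq (a b : List (List Int)) (hA : pvRectP a) (hB : pvRectP b) :
    PySem.Set.equal (pvASpace a) (pvASpace b) = PySem.Set.equal (pvBSpaceSig b) (pvBSpaceSig a) := by
  rcases hcond : PySem.Set.equal (pvBSpaceSig b) (pvBSpaceSig a) with _ | _
  · rw [Bool.eq_false_iff]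
    intro hcon
    rw [Bool.eq_false_iff] at hcond
    apply hcond
    rw [PySem.Set.equal_iff] at hcon ⊢
    intro x
    rw [pvMemBSpace, pvMemBSpace, ← pvMemASpace a hA, ← pvMemASpace b hB]
    exact (hcon x).symm
  · rw [PySem.Set.equal_iff] at hcond ⊢
    intro x
    rw [pvMemASpace a hA, pvMemASpace b hB, ← pvMemBSpace, ← pvMemBSpace]
    exact (hcond x).symm

theorem pvCondEq (a b : List (List Int)) (hA : pvRectP a) (hB : pvRectP b) :
    pvAHEquiv a b = pvBSigEq (pvBSig b) (pvBSig a) := by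
  unfold pvAHEquiv pvBSigEq pvBSig pvARowSpace pvAColumnSpace
  simp only []
  rw [pvColsEq a hA, pvColsEq b hB]
  rw [pvEqualEq a b hA hB,
      pvEqualEq (pvATranspose a) (pvATranspose b) (pvRectTranspose a) (pvRectTranspose b)]

-- invariant tying A's class list to B's association list
def pvInv (entries : List ((PySem.Set (List Int) × PySem.Set (List Int)) × List (List (List Int)))) : Prop :=
  ∀ e ∈ entries, ∃ h t, e.2 = h :: t ∧ pvRectP h ∧ e.1 = pvBSig h

theorem pvStep (mat : List (List Int)) (hM : pvRectP mat) (entries) (hI : pvInv entries) :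
    pvAInsert mat (entries.map (·.2)) = (pvBUpdate (pvBSig mat) mat entries).map (·.2) ∧
      pvInv (pvBUpdate (pvBSig mat) mat entries) := by
  induction entries with
  | nil =>
      refine ⟨rfl, ?_⟩
      rintro e he
      rcases List.mem_cons.mp he with rfl | h
      · exact ⟨mat, [], rfl, hM, rfl⟩
      · cases h
  | cons e rest ih =>
      obtain ⟨k, v⟩ := e
      obtain ⟨h, t, hv, hRh, hk⟩ := hI (k, v) List.mem_cons_self
      simp only at hv hk
      subst hv hk
      have hrest : pvInv rest := fun e he => hI e (List.mem_cons_of_mem _ he)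
      obtain ⟨ih1, ih2⟩ := ih hrest
      simp only [List.map_cons, pvAInsert, pvBUpdate]
      rw [PySem.List.pyGetD_zero_cons]
      rw [pvCondEq mat h hM hRh]
      rcases hc : pvBSigEq (pvBSig h) (pvBSig mat) with _ | _
      · simp only [Bool.false_eq_true, if_false]
        refine ⟨?_, ?_⟩
        · rw [ih1]; rfl
        · intro e he
          rcases List.mem_cons.mp he with rfl | he'
          · exact ⟨h, t, rfl, hRh, rfl⟩
          · exact ih2 e he'
      · simp only [if_true]
        refine ⟨rfl, ?_⟩
        intro e he
        rcases List.mem_cons.mp he with rfl | he'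
        · exact ⟨h, t ++ [mat], rfl, hRh, rfl⟩
        · exact hrest e he'

theorem pvLoop (ms : List (List (List Int))) (hR : ∀ m ∈ ms, pvRectP m) :
    ∀ entries, pvInv entries →
      ms.foldl (fun cs mat => pvAInsert mat cs) (entries.map (·.2)) =
        (ms.foldl (fun es mat => pvBUpdate (pvBSig mat) mat es) entries).map (·.2) := by
  induction ms with
  | nil => intro entries _; rfl
  | cons m t ih =>
      intro entries hI
      have hm := hR m List.mem_cons_self
      obtain ⟨h1, h2⟩ := pvStep m hm entries hI
      simp only [List.foldl_cons]
      rw [h1]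
      exact ih (fun x hx => hR x (List.mem_cons_of_mem _ hx)) _ h2

-- ===== VERDICT (by name: the statements are the Claim_ definition above) =====
theorem partial_h_class_spec : Claim_equal_partial_h_class := by
  intro matrices _ hPre
  rcases hPre with hlen | ⟨hAll, _⟩
  · rcases matrices with _ | ⟨m, _ | ⟨m2, t⟩⟩
    · rfl
    · rfl
    · simp at hlen
  · unfold Spec_partial_h_class partial_h_class partial_h_class_alt
    have := pvLoop matrices (fun m hm => (hAll m hm).2) [] (by intro e he; cases he)
    simpa using this
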